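-- pv_equiv track=rewrite | github.com/goldenmean/python | longest_substring_between_eq_chars.py | longest_substring_between_equal_chars
-- ===== SOURCE A (Python) =====
-- def longest_substring_between_equal_chars(s):
--     first_occurrence = {}
--     max_length = 0
--
--     for i, char in enumerate(s):
--         if char in first_occurrence:
--             # Calculate the length of the substring between two equal characters
--             length = i - first_occurrence[char] - 1
--             max_length = max(max_length, length)
--         else:
--             # Store the first occurrence of the character
--             first_occurrence[char] = i
--
--     return max_length
-- ===== SOURCE B (Python) =====
-- def longest_substring_between_equal_chars(s):
--     # Pass 1: table of first and last index of every character.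
--     first = {}
--     last = {}
--     for i, c in enumerate(s):
--         if c not in first:
--             first[c] = i
--         last[c] = i
--     # Pass 2: reduce over the distinct characters.
--     best = 0
--     for c in first:
--         best = max(best, last[c] - first[c] - 1)
--     return best
-- ===== Notes on version B (the rewrite author's own statement) =====
-- stated objective: alternative
-- what changed: A keeps a running max inline in its single scan; B separates the work into a table-building pass (first/last index of every character) followed by a reduction max(last[c]-first[c]-1) over the distinct characters.
import Mathlib
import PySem

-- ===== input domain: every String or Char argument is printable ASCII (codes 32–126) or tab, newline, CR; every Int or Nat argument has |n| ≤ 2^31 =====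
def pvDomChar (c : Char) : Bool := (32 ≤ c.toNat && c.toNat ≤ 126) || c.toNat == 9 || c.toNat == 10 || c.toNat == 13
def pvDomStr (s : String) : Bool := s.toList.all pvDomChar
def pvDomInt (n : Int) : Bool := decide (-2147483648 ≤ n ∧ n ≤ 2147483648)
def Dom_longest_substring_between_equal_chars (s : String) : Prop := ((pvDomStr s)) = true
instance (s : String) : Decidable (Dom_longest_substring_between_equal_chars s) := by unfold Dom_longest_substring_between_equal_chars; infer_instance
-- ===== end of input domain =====

-- B replaces A's inline running max by a build-first/last-table pass followed by a
-- reduction over the distinct characters (alternative decomposition, same cost).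

-- ===== PORT A =====
def longest_substring_between_equal_chars (s : String) : Int :=
  ((PySem.List.enumerate s.toList 0).foldl
      (fun (st : PySem.Dict Char Int × Int) (ic : Int × Char) =>
        if st.1.contains ic.2 then (st.1, max st.2 (ic.1 - st.1.getD ic.2 0 - 1))
        else (st.1.insert ic.2 ic.1, st.2))
      ((PySem.Dict.empty : PySem.Dict Char Int), 0)).2

-- ===== PORT B =====
def longest_substring_between_equal_chars_alt (s : String) : Int :=
  let b := (PySem.List.enumerate s.toList 0).foldl
      (fun (st : PySem.Dict Char Int × PySem.Dict Char Int) (ic : Int × Char) =>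
        ((if st.1.contains ic.2 then st.1 else st.1.insert ic.2 ic.1), st.2.insert ic.2 ic.1))
      ((PySem.Dict.empty : PySem.Dict Char Int), (PySem.Dict.empty : PySem.Dict Char Int))
  b.1.keys.foldl (fun m c => max m (b.2.getD c 0 - b.1.getD c 0 - 1)) 0

-- ===== PRECONDITION & SPEC =====
def Spec_longest_substring_between_equal_chars (s : String) (out : Int) : Prop := out = longest_substring_between_equal_chars_alt s
instance (s : String) (out : Int) : Decidable (Spec_longest_substring_between_equal_chars s out) := by unfold Spec_longest_substring_between_equal_chars; infer_instance

-- ===== CLAIM (what is proved, stated in full; the proofs are below) =====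
def Claim_equal_longest_substring_between_equal_chars : Prop := ∀ (s : String), Dom_longest_substring_between_equal_chars s → Spec_longest_substring_between_equal_chars s (longest_substring_between_equal_chars s)

-- ===== LEMMAS AND PROOFS =====

-- Pulling a max out of the initial accumulator of a running-max fold.
lemma lsbec_foldl_max_shift (g : Char → Int) (l : List Char) (a b : Int) :
    l.foldl (fun m x => max m (g x)) (max a b) = max b (l.foldl (fun m x => max m (g x)) a) := by
  induction l generalizing a with
  | nil => simp [max_comm]
  | cons x t ih =>
      simp only [List.foldl_cons]
      rw [max_right_comm a b (g x), ih]

-- Loop invariant: A's running max equals B's reduction over the tables built so far.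
lemma lsbec_loop (cs : List Char) (n : Int) (d dL : PySem.Dict Char Int) (m : Int)
    (hnd : d.keys.Nodup) (hk : dL.keys = d.keys)
    (hlt : ∀ x ∈ d.keys, dL.getD x 0 < n)
    (hm : m = d.keys.foldl (fun m x => max m (dL.getD x 0 - d.getD x 0 - 1)) 0) :
    ((PySem.List.enumerate cs n).foldl
      (fun (st : PySem.Dict Char Int × Int) (ic : Int × Char) =>
        if st.1.contains ic.2 then (st.1, max st.2 (ic.1 - st.1.getD ic.2 0 - 1))
        else (st.1.insert ic.2 ic.1, st.2)) (d, m)).2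
    = (let b := (PySem.List.enumerate cs n).foldl
        (fun (st : PySem.Dict Char Int × PySem.Dict Char Int) (ic : Int × Char) =>
          ((if st.1.contains ic.2 then st.1 else st.1.insert ic.2 ic.1), st.2.insert ic.2 ic.1))
        (d, dL);
       b.1.keys.foldl (fun m c => max m (b.2.getD c 0 - b.1.getD c 0 - 1)) 0) := by
  induction cs generalizing n d dL m with
  | nil =>
      simp only [PySem.List.enumerate_nil, List.foldl_nil]
      exact hm
  | cons c rest ih =>
      rw [PySem.List.enumerate_cons]
      simp only [List.foldl_cons]
      by_cases hc : d.contains c = true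
      · -- repeated character: A takes a new max, B overwrites last[c]
        have hcm : c ∈ d.keys := (PySem.Dict.contains_iff_mem_keys d c).mp hc
        have hcL : dL.contains c = true :=
          (PySem.Dict.contains_iff_mem_keys dL c).mpr (by rw [hk]; exact hcm)
        simp only [hc, if_true]
        refine ih (n + 1) d (dL.insert c n) (max m (n - d.getD c 0 - 1)) hnd ?_ ?_ ?_
        · rw [PySem.Dict.keys_insert_of_contains dL n hcL, hk]
        · intro x hx
          by_cases hxc : x = c
          · subst hxc; rw [PySem.Dict.getD_insert_self]; omega
          · rw [PySem.Dict.getD_insert_of_ne dL n 0 hxc]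
            have := hlt x hx; omega
        · -- the reduction over the updated last-table equals A's new running max
          obtain ⟨l1, l2, hsplit⟩ := List.append_of_mem hcm
          have hnd' := hnd
          rw [hsplit] at hnd'
          have hc1 : c ∉ l1 := by
            intro h; exact (List.disjoint_of_nodup_append hnd') h List.mem_cons_self
          have hc2 : c ∉ l2 := by
            have := (List.nodup_append.mp hnd').2.1
            exact (List.nodup_cons.mp this).1
          have hagree : ∀ (x : Char), x ≠ c →
              (dL.insert c n).getD x 0 = dL.getD x 0 := fun x hx =>
            PySem.Dict.getD_insert_of_ne dL n 0 hx
          have hcongr1 : List.foldl (fun m x => max m ((dL.insert c n).getD x 0 - d.getD x 0 - 1)) 0 l1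
              = List.foldl (fun m x => max m (dL.getD x 0 - d.getD x 0 - 1)) 0 l1 := by
            refine PySem.List.foldl_congr_mem l1 _ _ 0 (fun acc x hx => ?_)
            rw [hagree x (fun h => hc1 (h ▸ hx))]
          have hcongr2 : ∀ (a : Int),
              List.foldl (fun m x => max m ((dL.insert c n).getD x 0 - d.getD x 0 - 1)) a l2
              = List.foldl (fun m x => max m (dL.getD x 0 - d.getD x 0 - 1)) a l2 := by
            intro a
            refine PySem.List.foldl_congr_mem l2 _ _ a (fun acc x hx => ?_)
            rw [hagree x (fun h => hc2 (h ▸ hx))]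
          have hle : dL.getD c 0 - d.getD c 0 - 1 ≤ n - d.getD c 0 - 1 := by
            have := hlt c hcm; omega
          rw [hsplit, List.foldl_append, List.foldl_cons,
              PySem.Dict.getD_insert_self, hcongr1,
              lsbec_foldl_max_shift _ l2
                (List.foldl (fun m x => max m (dL.getD x 0 - d.getD x 0 - 1)) 0 l1)
                (n - d.getD c 0 - 1), hcongr2]
          rw [hm, hsplit, List.foldl_append, List.foldl_cons,
              lsbec_foldl_max_shift _ l2
                (List.foldl (fun m x => max m (dL.getD x 0 - d.getD x 0 - 1)) 0 l1)
                (dL.getD c 0 - d.getD c 0 - 1)]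
          omega
      · -- fresh character: both record index n; B's new entry contributes -1
        have hc' : d.contains c = false := by simpa using hc
        have hcm : c ∉ d.keys := fun h =>
          by rw [(PySem.Dict.contains_iff_mem_keys d c).mpr h] at hc'; cases hc'
        have hcL : dL.contains c = false := by
          rcases h : dL.contains c with _ | _
          · rfl
          · exact absurd ((PySem.Dict.contains_iff_mem_keys dL c).mp h)
              (by rw [hk]; exact hcm)
        simp only [hc', if_false, Bool.false_eq_true]
        refine ih (n + 1) (d.insert c n) (dL.insert c n) m
          (PySem.Dict.nodup_keys_insert d c n hnd) ?_ ?_ ?_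
        · rw [PySem.Dict.keys_insert_of_not_contains dL n hcL,
              PySem.Dict.keys_insert_of_not_contains d n hc', hk]
        · intro x hx
          rw [PySem.Dict.keys_insert_of_not_contains d n hc'] at hx
          rcases List.mem_append.mp hx with hx | hx
          · have hxc : x ≠ c := fun h => hcm (h ▸ hx)
            rw [PySem.Dict.getD_insert_of_ne dL n 0 hxc]
            have := hlt x hx; omega
          · have hxc : x = c := by simpa using hx
            subst hxc; rw [PySem.Dict.getD_insert_self]; omega
        · have hm0 : 0 ≤ m := hm ▸ (PySem.List.le_foldl_max_int d.keys _ 0).1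
          rw [PySem.Dict.keys_insert_of_not_contains d n hc', List.foldl_append,
              List.foldl_cons, List.foldl_nil,
              PySem.Dict.getD_insert_self, PySem.Dict.getD_insert_self]
          have hcongr : List.foldl
              (fun m x => max m ((dL.insert c n).getD x 0 - (d.insert c n).getD x 0 - 1)) 0 d.keys
              = List.foldl (fun m x => max m (dL.getD x 0 - d.getD x 0 - 1)) 0 d.keys := by
            refine PySem.List.foldl_congr_mem d.keys _ _ 0 (fun acc x hx => ?_)
            have hxc : x ≠ c := fun h => hcm (h ▸ hx)
            rw [PySem.Dict.getD_insert_of_ne dL n 0 hxc,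
                PySem.Dict.getD_insert_of_ne d n 0 hxc]
          rw [hcongr, ← hm]
          omega

-- ===== VERDICT (by name: the statement is the Claim_ definition above) =====
theorem longest_substring_between_equal_chars_spec : Claim_equal_longest_substring_between_equal_chars := by
  intro s _
  unfold Spec_longest_substring_between_equal_chars longest_substring_between_equal_chars longest_substring_between_equal_chars_alt
  exact lsbec_loop s.toList 0 PySem.Dict.empty PySem.Dict.empty 0 (by simp) (by simp) (by simp) (by simp)
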